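-- pv_equiv track=rewrite | github.com/ziuge/programmers | 문자열 압축.py | check
-- ===== SOURCE A (Python) =====
-- def check(s, n): # n = 단위
--     result = ''
--     cnt = 1
--     for i in range(0, len(s), n):
--         if s[i:i+n] == s[i+n:i+n*2]: # n개 단위로 나눴을 때 같은 부분이 있으면 cnt+1
--             cnt += 1
--             if i+n*2 == len(s): # 만약 맨 끝이면 끝내고 result 뒤에 붙임
--                 result = result + str(cnt) + s[i:i+n]
--         else: # 같은 부분이 없으면
--             if cnt == 1:
--                 result = result + s[i:i+n] # result 뒤에 붙임
--             elif cnt != 1 and i+n < len(s):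
--                 result = result + str(cnt) + s[i:i+n] # result 뒤에 반복된 횟수와 함께 붙임
--                 cnt = 1
--     result = ''.join(i for i in result)
--     return result
-- ===== SOURCE B (Python) =====
-- def check(s, n):
--     chunks = [s[i:i+n] for i in range(0, len(s), n)]
--     out = ''
--     pos = 0
--     while pos < len(chunks):
--         end = pos
--         while end < len(chunks) and chunks[end] == chunks[pos]:
--             end += 1
--         length = end - pos
--         out += chunks[pos] if length == 1 else str(length) + chunks[pos]
--         pos = end
--     return out
-- ===== Notes on version B (the rewrite author's own statement) =====
-- stated objective: simpler
-- what changed: A is a single lookahead state machine over chunk indices with a cnt accumulator and three special end-of-string branches (slicing and comparing two n-chunks at every index, then re-joining the result character by character); B materializes the chunk list once and does one plain run-grouping pass over consecutive equal chunks, with no lookahead state or end-of-string cases.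
import Mathlib
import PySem

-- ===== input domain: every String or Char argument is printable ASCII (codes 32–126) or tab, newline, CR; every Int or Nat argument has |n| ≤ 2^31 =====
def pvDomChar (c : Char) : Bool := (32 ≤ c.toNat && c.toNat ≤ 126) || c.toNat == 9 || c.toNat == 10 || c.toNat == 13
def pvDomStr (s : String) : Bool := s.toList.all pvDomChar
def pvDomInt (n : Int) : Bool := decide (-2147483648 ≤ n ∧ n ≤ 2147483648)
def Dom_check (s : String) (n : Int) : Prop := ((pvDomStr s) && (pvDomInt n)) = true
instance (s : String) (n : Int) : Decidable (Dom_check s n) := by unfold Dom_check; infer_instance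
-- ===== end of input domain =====

-- B replaces A's index/lookahead state machine by an explicit chunk list plus one run-grouping pass (simpler; equal on all n ≠ 0).


-- ===== PORT A =====
-- loop body of A: state = (result, cnt), loop variable i
def checkBody (cs : List Char) (n len : Int) (st : List Char × Int) (i : Int) : List Char × Int :=
  let result := st.1
  let cnt := st.2
  if PySem.List.slice cs (some i) (some (i + n)) = PySem.List.slice cs (some (i + n)) (some (i + n * 2)) then
    let cnt := cnt + 1
    if i + n * 2 = len then (result ++ PySem.Int.toChars cnt ++ PySem.List.slice cs (some i) (some (i + n)), cnt)
    else (result, cnt)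
  else
    if cnt = 1 then (result ++ PySem.List.slice cs (some i) (some (i + n)), cnt)
    else if cnt ≠ 1 ∧ i + n < len then (result ++ PySem.Int.toChars cnt ++ PySem.List.slice cs (some i) (some (i + n)), 1)
    else (result, cnt)

def check (s : String) (n : Int) : String :=
  let cs := s.toList
  let st := (PySem.List.pyRange 0 (PySem.Str.len s) n).foldl (checkBody cs n (PySem.Str.len s)) ([], 1)
  -- result = ''.join(i for i in result)
  String.ofList (PySem.Chars.join [] (st.1.map (fun c => [c])))

-- ===== PORT B =====
-- the run-grouping pass of B: consume the run at the head (inner while), emit, continue at its end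
def groupRun : List (List Char) → List Char
  | [] => []
  | c :: t =>
    let k := (t.takeWhile (fun x => decide (x = c))).length
    let length : Int := 1 + k
    (if length = 1 then c else PySem.Int.toChars length ++ c) ++ groupRun (t.drop k)
termination_by l => l.length
decreasing_by simp

def check_alt (s : String) (n : Int) : String :=
  let cs := s.toList
  let chunks := (PySem.List.pyRange 0 (PySem.Str.len s) n).map
    (fun i => PySem.List.slice cs (some i) (some (i + n)))
  String.ofList (groupRun chunks)

-- ===== PRECONDITION & SPEC =====
-- Pre_ excludes only n = 0, on which Python A raises ValueError (range() with step 0).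
def Pre_check (s : String) (n : Int) : Prop := n ≠ 0
instance (s : String) (n : Int) : Decidable (Pre_check s n) := by unfold Pre_check; infer_instance
def pvWitness_check : String × Int := ("aabbaccc", 2)

def Spec_check (s : String) (n : Int) (out : String) : Prop := out = check_alt s n
instance (s : String) (n : Int) (out : String) : Decidable (Spec_check s n out) := by unfold Spec_check; infer_instance

-- ===== CLAIM (what is proved, stated in full; the proofs are below) =====
def Claim_equal_check : Prop := ∀ (s : String) (n : Int), Dom_check s n → Pre_check s n → Spec_check s n (check s n)

-- ===== LEMMAS AND PROOFS =====

-- pyRange facts for a general positive/negative step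
theorem pyRange_pos_cons (a b s : Int) (hs : 0 < s) (hab : a < b) :
    PySem.List.pyRange a b s = a :: PySem.List.pyRange (a + s) b s := by
  have hu0 : (0:Int) ≤ b - a - 1 := by omega
  have hq0 : 0 ≤ (b - a - 1) / s := Int.ediv_nonneg hu0 hs.le
  have h1 : b - a + s - 1 = (b - a - 1) + 1 * s := by ring
  rw [PySem.List.pyRange_of_pos _ _ hs, PySem.List.pyRange_of_pos _ _ hs]
  rw [if_pos hab, h1, Int.add_mul_ediv_right _ _ hs.ne']
  have hcnt : ((b - a - 1) / s + 1).toNat = ((b - a - 1) / s).toNat + 1 := by omega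
  rw [hcnt, List.range_succ_eq_map, List.map_cons, List.map_map]
  refine List.cons_eq_cons.mpr ⟨by simp, ?_⟩
  · by_cases h2 : a + s < b
    · rw [if_pos h2]
      have h3 : b - (a + s) + s - 1 = b - a - 1 := by ring
      rw [h3]
      apply List.map_congr_left
      intro k _
      simp only [Function.comp_apply]
      push_cast
      ring
    · rw [if_neg h2]
      have h3 : (b - a - 1) / s = 0 := Int.ediv_eq_zero_of_lt hu0 (by omega)
      simp [h3]

theorem pyRange_pos_nil (a b s : Int) (hs : 0 < s) (hab : b ≤ a) :
    PySem.List.pyRange a b s = [] := by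
  rw [PySem.List.pyRange_of_pos _ _ hs, if_neg (by omega)]
  simp

theorem pyRange_neg_nil (a b s : Int) (hs : s < 0) (hab : a ≤ b) :
    PySem.List.pyRange a b s = [] := by
  unfold PySem.List.pyRange
  rw [if_neg (by omega : ¬ s = 0)]
  simp only
  rw [if_neg (by omega : ¬ 0 < s), if_neg (by omega : ¬ b < a)]
  simp

-- the chunk decomposition of a list (proof-side description of both programs' chunking)
def chunksOf (m : Nat) (cs : List Char) : List (List Char) :=
  if h : cs = [] ∨ m = 0 then [] else cs.take m :: chunksOf m (cs.drop m)
termination_by cs.length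
decreasing_by
  rcases Nat.eq_zero_or_pos m with hm | hm
  · exact absurd (Or.inr hm) h
  · have : cs ≠ [] := fun hc => h (Or.inl hc)
    have : 0 < cs.length := List.length_pos_iff.mpr this
    simp; omega

-- A's state machine rewritten as a recursion over the chunk list
def goA (m : Nat) : Int → List (List Char) → List Char
  | _, [] => []
  | cnt, [c] => if cnt = 1 then c else []
  | cnt, c :: c' :: rest =>
    if c = c' then
      (if rest = [] ∧ c'.length = m then PySem.Int.toChars (cnt + 1) ++ c else []) ++ goA m (cnt + 1) (c' :: rest)
    else
      (if cnt = 1 then c else PySem.Int.toChars cnt ++ c) ++ goA m 1 (c' :: rest)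

-- every chunk is nonempty, every non-last chunk has length m
def ChunksValid (m : Nat) : List (List Char) → Prop
  | [] => True
  | [c] => c ≠ []
  | c :: c' :: rest => c.length = m ∧ ChunksValid m (c' :: rest)

theorem chunksOf_nil (m : Nat) : chunksOf m [] = [] := by
  rw [chunksOf]; simp

theorem chunksOf_cons (m : Nat) (hm : m ≠ 0) (cs : List Char) (hcs : cs ≠ []) :
    chunksOf m cs = cs.take m :: chunksOf m (cs.drop m) := by
  rw [chunksOf]; rw [dif_neg (by simp [hcs, hm])]

theorem chunksOf_eq_nil_iff (m : Nat) (hm : m ≠ 0) (cs : List Char) :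
    chunksOf m cs = [] ↔ cs = [] := by
  by_cases hcs : cs = []
  · simp [hcs, chunksOf_nil]
  · rw [chunksOf_cons m hm cs hcs]
    simp [hcs]

theorem foldA_eq (cs : List Char) (m : Nat) (hm : 1 ≤ m) :
    ∀ (d i : Nat) (res : List Char) (cnt : Int), cs.length ≤ i + d →
    ((PySem.List.pyRange (i : Int) (cs.length : Int) (m : Int)).foldl
        (checkBody cs (m : Int) (cs.length : Int)) (res, cnt)).1
      = res ++ goA m cnt (chunksOf m (cs.drop i)) := by
  intro d
  induction d with
  | zero =>
    intro i res cnt h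
    rw [pyRange_pos_nil _ _ _ (by exact_mod_cast hm) (by exact_mod_cast h)]
    rw [List.drop_eq_nil_of_le (by omega), chunksOf_nil]
    simp [goA]
  | succ d ih =>
    intro i res cnt h
    by_cases hi : cs.length ≤ i
    · rw [pyRange_pos_nil _ _ _ (by exact_mod_cast hm) (by exact_mod_cast hi)]
      rw [List.drop_eq_nil_of_le hi, chunksOf_nil]
      simp [goA]
    · push_neg at hi
      rw [pyRange_pos_cons _ _ _ (by exact_mod_cast hm) (by exact_mod_cast hi)]
      rw [List.foldl_cons]
      have hc1 : (i : Int) + (m : Int) = ((i + m : Nat) : Int) := by push_cast; ring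
      have hc2 : (i : Int) + (m : Int) * 2 = ((i + m : Nat) : Int) + ((m : Nat) : Int) := by push_cast; ring
      have hchunk : PySem.List.slice cs (some (i : Int)) (some ((i : Int) + (m : Int)))
          = List.take m (List.drop i cs) := PySem.List.slice_natCast_add cs i m
      have hnext : PySem.List.slice cs (some ((i : Int) + (m : Int))) (some ((i : Int) + (m : Int) * 2))
          = List.take m (List.drop (i + m) cs) := by
        rw [hc2, hc1]; exact PySem.List.slice_natCast_add cs (i + m) m
      have hCne : List.take m (List.drop i cs) ≠ [] := by
        simp [List.take_eq_nil_iff, List.drop_eq_nil_iff]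
        omega
      have hch : chunksOf m (cs.drop i) = List.take m (List.drop i cs) :: chunksOf m (cs.drop (i + m)) := by
        rw [chunksOf_cons m (by omega) _ (by simp [List.drop_eq_nil_iff]; omega), List.drop_drop]
      rw [hch]
      simp only [checkBody, hchunk, hnext]
      by_cases hdrop : cs.length ≤ i + m
      · -- the chunk at i is the last one
        have hC' : List.take m (List.drop (i + m) cs) = [] := by
          simp [List.take_eq_nil_iff, List.drop_eq_nil_iff]
          omega
        have hnil : chunksOf m (cs.drop (i + m)) = [] := by
          rw [(chunksOf_eq_nil_iff m (by omega) _), List.drop_eq_nil_iff]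
          omega
        rw [hnil]
        rw [if_neg (by rw [hC']; exact hCne)]
        by_cases hcnt : cnt = 1
        · rw [if_pos hcnt]
          rw [hc1, ih (i + m) _ _ (by omega), hnil]
          simp [goA, hcnt]
        · rw [if_neg hcnt, if_neg (fun hx => (by push_cast; omega : ¬ ((i : Int) + (m : Int) < (cs.length : Int))) hx.2)]
          rw [hc1, ih (i + m) _ _ (by omega), hnil]
          simp [goA, hcnt]
      · -- there is a next chunk
        push_neg at hdrop
        have hch2 : chunksOf m (cs.drop (i + m)) = List.take m (List.drop (i + m) cs) :: chunksOf m (cs.drop (i + m + m)) := by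
          rw [chunksOf_cons m (by omega) _ (by simp [List.drop_eq_nil_iff]; omega), List.drop_drop]
        by_cases heq : List.take m (List.drop i cs) = List.take m (List.drop (i + m) cs)
        · rw [if_pos heq]
          have hcond : ((i : Int) + (m : Int) * 2 = (cs.length : Int)) ↔
              (chunksOf m (cs.drop (i + m + m)) = [] ∧ (List.take m (List.drop (i + m) cs)).length = m) := by
            rw [chunksOf_eq_nil_iff m (by omega), List.drop_eq_nil_iff]
            simp [List.length_take, List.length_drop]
            constructor
            · intro hx
              have : i + m * 2 = cs.length := by exact_mod_cast hx
              omega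
            · intro hx
              have : (i:Int) + (m:Int) * 2 = ((i + m * 2 : Nat) : Int) := by push_cast; ring
              rw [this]
              exact_mod_cast (by omega : i + m * 2 = cs.length)
          by_cases hcend : (i : Int) + (m : Int) * 2 = (cs.length : Int)
          · rw [if_pos hcend]
            rw [hc1, ih (i + m) _ _ (by omega), hch2, goA, if_pos heq, if_pos (hcond.mp hcend), ← hch2]
            simp [List.append_assoc]
          · rw [if_neg hcend]
            rw [hc1, ih (i + m) _ _ (by omega), hch2, goA, if_pos heq, if_neg (fun hx => hcend (hcond.mpr hx)), ← hch2]
            simp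
        · rw [if_neg heq]
          rw [hch2, goA, if_neg heq, ← hch2]
          by_cases hcnt : cnt = 1
          · rw [if_pos hcnt]
            rw [hc1, ih (i + m) _ _ (by omega)]
            simp [hcnt, List.append_assoc]
          · rw [if_neg hcnt, if_pos ⟨hcnt, by exact_mod_cast (by push_cast; omega : (i:Int) + (m:Int) < (cs.length : Int))⟩]
            rw [hc1, ih (i + m) _ _ (by omega)]
            simp [hcnt, List.append_assoc]

theorem chunksB_eq (cs : List Char) (m : Nat) (hm : 1 ≤ m) :
    ∀ (d i : Nat), cs.length ≤ i + d →
    (PySem.List.pyRange (i : Int) (cs.length : Int) (m : Int)).map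
        (fun j => PySem.List.slice cs (some j) (some (j + (m : Int))))
      = chunksOf m (cs.drop i) := by
  intro d
  induction d with
  | zero =>
    intro i h
    rw [pyRange_pos_nil _ _ _ (by exact_mod_cast hm) (by exact_mod_cast h)]
    rw [List.drop_eq_nil_of_le (by omega), chunksOf_nil]
    rfl
  | succ d ih =>
    intro i h
    by_cases hi : cs.length ≤ i
    · rw [pyRange_pos_nil _ _ _ (by exact_mod_cast hm) (by exact_mod_cast hi)]
      rw [List.drop_eq_nil_of_le hi, chunksOf_nil]
      rfl
    · push_neg at hi
      rw [pyRange_pos_cons _ _ _ (by exact_mod_cast hm) (by exact_mod_cast hi)]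
      rw [List.map_cons]
      have hc : (i : Int) + (m : Int) = ((i + m : Nat) : Int) := by push_cast; ring
      rw [chunksOf_cons m (by omega) _ (by simp [List.drop_eq_nil_iff]; omega)]
      refine List.cons_eq_cons.mpr ⟨?_, ?_⟩
      · exact PySem.List.slice_natCast_add cs i m
      · rw [hc, ih (i + m) (by omega), List.drop_drop]

theorem chunksOf_valid_fuel (m : Nat) (hm : 1 ≤ m) :
    ∀ (d : Nat) (cs : List Char), cs.length ≤ d → ChunksValid m (chunksOf m cs) := by
  intro d
  induction d with
  | zero =>
    intro cs h
    have : cs = [] := by cases cs <;> simp_all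
    rw [this, chunksOf_nil]
    trivial
  | succ d ih =>
    intro cs h
    by_cases hcs : cs = []
    · rw [hcs, chunksOf_nil]; trivial
    · rw [chunksOf_cons m (by omega) cs hcs]
      by_cases hd : cs.drop m = []
      · rw [hd, chunksOf_nil]
        simp only [ChunksValid]
        simp [List.take_eq_nil_iff, hcs]
        omega
      · have hlen : m < cs.length := by
          by_contra hc
          exact hd (List.drop_eq_nil_of_le (by omega))
        have := ih (cs.drop m) (by simp; omega)
        rw [chunksOf_cons m (by omega) _ hd] at this ⊢
        simp only [ChunksValid]
        exact ⟨by simp [List.length_take]; omega, this⟩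

theorem chunksOf_valid (m : Nat) (hm : 1 ≤ m) (cs : List Char) : ChunksValid m (chunksOf m cs) :=
  chunksOf_valid_fuel m hm cs.length cs le_rfl

theorem takeWhile_eq_replicate (c : List Char) (t : List (List Char)) :
    t.takeWhile (fun x => decide (x = c)) =
      List.replicate (t.takeWhile (fun x => decide (x = c))).length c := by
  induction t with
  | nil => rfl
  | cons a t ih =>
    by_cases h : a = c
    · simp [List.takeWhile_cons, h, List.replicate_succ]
      exact ih
    · simp [List.takeWhile_cons, h]

theorem runA (m : Nat) (c : List Char) :
    ∀ (j : Nat) (rest : List (List Char)) (cnt : Int), 1 ≤ cnt → c ≠ [] →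
    ((j ≠ 0 ∨ rest ≠ []) → c.length = m) →
    (∀ r, rest.head? = some r → r ≠ c) →
    goA m cnt (c :: (List.replicate j c ++ rest)) =
      (if cnt + j = 1 then c
       else if j = 0 ∧ rest = [] then []
       else PySem.Int.toChars (cnt + j) ++ c) ++ goA m 1 rest := by
  intro j
  induction j with
  | zero =>
    intro rest cnt hcnt hc hlen hhead
    simp only [List.replicate_zero, List.nil_append, Nat.cast_zero, add_zero]
    cases rest with
    | nil =>
      by_cases h1 : cnt = 1 <;> simp [goA, h1]
    | cons r rs =>
      have hr : ¬ (c = r) := fun he => hhead r rfl he.symm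
      by_cases h1 : cnt = 1 <;> simp [goA, hr, h1]
  | succ j ih =>
    intro rest cnt hcnt hc hlen hhead
    have hcm : c.length = m := hlen (Or.inl (by omega))
    rw [List.replicate_succ, List.cons_append]
    simp only [goA]
    simp only [if_true]
    rw [ih rest (cnt + 1) (by omega) hc (fun _ => hcm) hhead]
    by_cases hj : j = 0
    · subst hj
      by_cases hrest : rest = []
      · subst hrest
        have hcc : ¬ (cnt + 1 = 1) := by omega
        simp [goA, hcm, hcc]
      · simp [goA, hrest]
    · have e1 : ¬ (List.replicate j c ++ rest = [] ∧ c.length = m) := by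
        intro hx
        rcases List.append_eq_nil_iff.mp hx.1 with ⟨hr1, _⟩
        exact hj (by simpa using congrArg List.length hr1)
      have e2 : ¬ (cnt + 1 + (j : Int) = 1) := by omega
      have e3 : ¬ (j = 0 ∧ rest = []) := fun hx => hj hx.1
      rw [if_neg e1, if_neg e2, if_neg e3]
      have e4 : ¬ (cnt + ((j + 1 : Nat) : Int) = 1) := by push_cast; omega
      have e5 : ¬ ((j + 1 : Nat) = 0 ∧ rest = []) := fun hx => Nat.succ_ne_zero j hx.1
      rw [if_neg e4, if_neg e5]
      have e6 : cnt + 1 + (j : Int) = cnt + ((j + 1 : Nat) : Int) := by push_cast; ring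
      rw [e6]
      simp

theorem chunksValid_tail (m : Nat) (c : List Char) (t : List (List Char)) (h : ChunksValid m (c :: t)) : ChunksValid m t := by
  cases t with
  | nil => trivial
  | cons a t' => exact h.2

theorem chunksValid_drop (m : Nat) (k : Nat) : ∀ (l : List (List Char)), ChunksValid m l → ChunksValid m (l.drop k) := by
  induction k with
  | zero => intro l h; simpa using h
  | succ k ih =>
    intro l h
    cases l with
    | nil => trivial
    | cons c t =>
      rw [List.drop_succ_cons]
      exact ih t (chunksValid_tail m c t h)

theorem goA_eq_groupRun (m : Nat) (hm : 1 ≤ m) :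
    ∀ (l : List (List Char)), ChunksValid m l → goA m 1 l = groupRun l := by
  suffices h : ∀ (d : Nat) (l : List (List Char)), l.length ≤ d → ChunksValid m l → goA m 1 l = groupRun l by
    intro l hv
    exact h l.length l le_rfl hv
  intro d
  induction d with
  | zero =>
    intro l hd hv
    have : l = [] := by cases l <;> simp_all
    subst this
    simp [goA, groupRun]
  | succ d ih =>
    intro l hd hv
    cases l with
    | nil => simp [goA, groupRun]
    | cons c t =>
      have hp := takeWhile_eq_replicate c t
      have hdrop : t.drop (t.takeWhile (fun x => decide (x = c))).length
          = t.dropWhile (fun x => decide (x = c)) := by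
        have h : List.drop (t.takeWhile (fun x => decide (x = c))).length
            (t.takeWhile (fun x => decide (x = c)) ++ t.dropWhile (fun x => decide (x = c)))
            = t.dropWhile (fun x => decide (x = c)) := List.drop_left
        rwa [List.takeWhile_append_dropWhile] at h
      have hsplit : t = List.replicate (t.takeWhile (fun x => decide (x = c))).length c
          ++ t.dropWhile (fun x => decide (x = c)) := by
        conv_lhs => rw [← List.takeWhile_append_dropWhile (p := fun x => decide (x = c)) (l := t)]
        exact congrArg (fun l => l ++ t.dropWhile (fun x => decide (x = c))) hp
      have hhead : ∀ r, (t.dropWhile (fun x => decide (x = c))).head? = some r → r ≠ c := by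
        intro r hr
        have := List.head?_dropWhile_not (fun x => decide (x = c)) t
        rw [hr] at this
        simpa using this
      have hvt : ChunksValid m t := by
        cases t with
        | nil => trivial
        | cons a t' => exact hv.2
      have hvd : ChunksValid m (t.dropWhile (fun x => decide (x = c))) := by
        rw [← hdrop]
        exact chunksValid_drop m _ t hvt
      have hc : c ≠ [] := by
        cases t with
        | nil => exact hv
        | cons a t' =>
          have : c.length = m := hv.1
          intro he
          rw [he] at this
          simp at this
          omega
      have hlen : ((t.takeWhile (fun x => decide (x = c))).length ≠ 0
          ∨ t.dropWhile (fun x => decide (x = c)) ≠ []) → c.length = m := by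
        intro hor
        cases t with
        | nil => simp at hor
        | cons a t' => exact hv.1
      have hgo : goA m 1 (c :: t) = goA m 1 (c :: (List.replicate (t.takeWhile (fun x => decide (x = c))).length c ++ t.dropWhile (fun x => decide (x = c)))) := by
        rw [← hsplit]
      rw [hgo, runA m c _ _ 1 le_rfl hc hlen hhead]
      simp only [groupRun]
      rw [hdrop]
      rw [ih _ (by rw [hdrop] at *; have := List.length_dropWhile_le (p := fun x => decide (x = c)) (l := t); simp at hd ⊢; omega) hvd]
      congr 1
      by_cases hj : (t.takeWhile (fun x => decide (x = c))).length = 0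
      · simp [hj]
      · have hne1 : ¬ ((1 : Int) + ((t.takeWhile (fun x => decide (x = c))).length : Int) = 1) := by
          omega
        have hne2 : ¬ ((t.takeWhile (fun x => decide (x = c))).length = 0
            ∧ t.dropWhile (fun x => decide (x = c)) = []) := fun hx => hj hx.1
        rw [if_neg hne1, if_neg hne2, if_neg hne1]

-- ===== VERDICT (by name: the statement is the Claim_ definition above) =====
theorem check_spec : Claim_equal_check := by
  unfold Claim_equal_check
  intro s n _ hpre
  unfold Spec_check check check_alt
  simp only []
  rcases lt_trichotomy n 0 with hn | hn | hn
  · rw [pyRange_neg_nil _ _ _ hn (by simp [PySem.Str.len_eq])]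
    simp [groupRun, PySem.Chars.join, List.intercalate]
  · exact absurd hn hpre
  · have hm1 : 1 ≤ n.toNat := by omega
    have hncast : n = ((n.toNat : Nat) : Int) := (Int.toNat_of_nonneg hn.le).symm
    have hlen : PySem.Str.len s = ((s.toList.length : Nat) : Int) := by
      simp [PySem.Str.len_eq]
    rw [hncast, hlen]
    rw [show ((0 : Int)) = (((0 : Nat) : Nat) : Int) by simp]
    rw [foldA_eq s.toList n.toNat hm1 s.toList.length 0 [] 1 (by omega)]
    rw [chunksB_eq s.toList n.toNat hm1 s.toList.length 0 (by omega)]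
    rw [List.drop_zero, List.nil_append]
    rw [PySem.Chars.join_nil_singletons]
    rw [goA_eq_groupRun n.toNat hm1 _ (chunksOf_valid n.toNat hm1 s.toList)]
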